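-- pv_equiv track=rewrite | github.com/Nemo2295/nextpy | next.py exercises 2022.py | check_id_valid
-- ===== SOURCE A (Python) =====
-- def check_id_valid(id_number):  # This function works only when input is an int
--     """
--     This function checks if an Israeli ID is valid or not.
--     :param id_number: given Israeli ID number from user
--     :type id_number: int # but also can accept string
--     :return: The function return True if the Israeli ID is valid, and False if not
--     :rtype: boolean
--     """
--     doubled_id_number_list = [int(str(id_number)[i]) * 2 if i % 2 == 1 else int(str(id_number)[i]) for i in range(9)]
--     # The line above creates a list in which every number in the ID and if he is in even index is doubled by 2, and
--     # if the number is in the odd index then it just adds him to the list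
--     separated_digits = [int((str(number))[0]) + int((str(number))[1]) if len(str(number)) == 2 else number for
--                         number in doubled_id_number_list]
--     #  The line above creates a list of the sum of separated digits of every number from the list doubled_id_number_list
--     if sum(separated_digits) % 10 == 0:
--         return True
--     else:
--         return False
-- ===== SOURCE B (Python) =====
-- def check_id_valid(id_number):
--     """Tail-recursive scan of the first 9 digit characters with a precomputed
--     lookup table for the digit-sum of a doubled digit; no intermediate lists,
--     no string-splitting of two-digit values."""
--     DOUBLED = (0, 2, 4, 6, 8, 1, 3, 5, 7, 9)
--     s = str(id_number)
--
--     def go(i, acc):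
--         if i == 9:
--             return acc % 10 == 0
--         d = int(s[i])
--         return go(i + 1, acc + (DOUBLED[d] if i % 2 == 1 else d))
--
--     return go(0, 0)
-- ===== Notes on version B (the rewrite author's own statement) =====
-- stated objective: alternative
-- what changed: Replaces A's two staged list comprehensions (double odd-index digits, then split two-digit entries back through str() and sum their characters, then sum the list) by one tail-recursive scan carrying an integer accumulator that reads the doubled-digit contribution from a precomputed lookup table.
-- outside the precondition, e.g. on check_id_valid(9): A raises IndexError, B raises IndexError; on check_id_valid(-123456789): A raises ValueError, B raises ValueError
import Mathlib
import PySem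

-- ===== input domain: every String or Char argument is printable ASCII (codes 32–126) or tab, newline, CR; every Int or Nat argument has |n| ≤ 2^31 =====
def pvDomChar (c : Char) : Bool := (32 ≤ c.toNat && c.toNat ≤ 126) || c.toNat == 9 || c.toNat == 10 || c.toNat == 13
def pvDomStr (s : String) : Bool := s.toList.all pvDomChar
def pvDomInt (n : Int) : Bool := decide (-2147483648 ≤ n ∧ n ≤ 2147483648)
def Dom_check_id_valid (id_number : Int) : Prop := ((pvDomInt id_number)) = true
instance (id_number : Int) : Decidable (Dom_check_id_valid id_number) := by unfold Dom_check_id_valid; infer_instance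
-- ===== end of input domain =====

-- B replaces A's two staged list comprehensions (and string-splitting of doubled digits)
-- by one tail-recursive scan with an integer accumulator and a precomputed lookup table.

-- int(str(x)[i]) for both ports; the .getD 0 default is unreachable under Pre_ (index in
-- range and a digit character), where Python would raise instead.
def pvDigit (cs : List Char) (i : Int) : Int :=
  ((PySem.List.pyGet? cs i).bind (fun c => PySem.Int.ofChars? [c])).getD 0

-- ===== PORT A =====
def check_id_valid (id_number : Int) : Bool :=
  let s := PySem.Int.toChars id_number
  let doubled := (PySem.List.pyRange 0 9 1).map (fun i =>
      if PySem.Int.mod i 2 == 1 then pvDigit s i * 2 else pvDigit s i)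
  let separated := doubled.map (fun number =>
      let t := PySem.Int.toChars number
      if PySem.List.len t == 2 then pvDigit t 0 + pvDigit t 1 else number)
  if PySem.Int.mod separated.sum 10 == 0 then true else false

-- ===== PORT B =====
-- B's DOUBLED tuple; tuple indexing DOUBLED[d] is PySem.List.pyGet? (getD 0 unreachable:
-- d is a digit 0..9 under Pre_).
def pvDOUBLED : List Int := [0, 2, 4, 6, 8, 1, 3, 5, 7, 9]

-- B's inner recursive go(i, acc); the Nat argument is the fuel 9 - i making the
-- recursion structural, i itself is the second argument exactly as in Source B.
def pvGo (s : List Char) : Nat → Int → Int → Bool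
  | 0, _, acc => PySem.Int.mod acc 10 == 0
  | Nat.succ k, i, acc =>
      let d := pvDigit s i
      pvGo s k (i + 1)
        (acc + (if PySem.Int.mod i 2 == 1 then (PySem.List.pyGet? pvDOUBLED d).getD 0 else d))

def check_id_valid_alt (id_number : Int) : Bool :=
  pvGo (PySem.Int.toChars id_number) 9 0 0

-- ===== PRECONDITION & SPEC =====
-- A raises on every other int: IndexError when str(id_number) has fewer than 9
-- characters, ValueError on the '-' of a negative number.
def Pre_check_id_valid (id_number : Int) : Prop := 100000000 ≤ id_number
instance (id_number : Int) : Decidable (Pre_check_id_valid id_number) := by unfold Pre_check_id_valid; infer_instance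
def pvWitness_check_id_valid : Int := 123456789
def Spec_check_id_valid (id_number : Int) (out : Bool) : Prop := out = check_id_valid_alt id_number
instance (id_number : Int) (out : Bool) : Decidable (Spec_check_id_valid id_number out) := by unfold Spec_check_id_valid; infer_instance

-- ===== CLAIM (what is proved, stated in full; the proofs are below) =====
def Claim_equal_check_id_valid : Prop := ∀ (id_number : Int), Dom_check_id_valid id_number → Pre_check_id_valid id_number → Spec_check_id_valid id_number (check_id_valid id_number)

-- ===== LEMMAS AND PROOFS =====

def pvDigitChars : List Char := ['0','1','2','3','4','5','6','7','8','9']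

theorem pv_toDigitsCore_mem (fuel : Nat) : ∀ (n : Nat) (ds : List Char),
    (∀ c ∈ ds, c ∈ pvDigitChars) → ∀ c ∈ Nat.toDigitsCore 10 fuel n ds, c ∈ pvDigitChars := by
  induction fuel with
  | zero => intro n ds hds c hc; exact hds c hc
  | succ fuel ih =>
    intro n ds hds c hc
    have hd : (n % 10).digitChar ∈ pvDigitChars := by
      have : n % 10 < 10 := Nat.mod_lt _ (by omega)
      interval_cases (n % 10) <;> decide
    simp only [Nat.toDigitsCore] at hc
    split at hc
    · exact (List.mem_cons.1 hc).elim (fun h => h ▸ hd) (hds c)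
    · exact ih _ _ (fun c hc => (List.mem_cons.1 hc).elim (fun h => h ▸ hd) (hds c)) c hc

theorem pv_mem_toChars {n : Int} (hn : 0 ≤ n) :
    ∀ c ∈ PySem.Int.toChars n, c ∈ pvDigitChars := by
  intro c hc
  unfold PySem.Int.toChars at hc
  rw [if_neg (by omega)] at hc
  exact pv_toDigitsCore_mem _ _ _ (by simp) c hc

theorem pvDigit_bounds {cs : List Char} (h : ∀ c ∈ cs, c ∈ pvDigitChars) (i : Int) :
    0 ≤ pvDigit cs i ∧ pvDigit cs i ≤ 9 := by
  unfold pvDigit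
  cases hg : PySem.List.pyGet? cs i with
  | none => simp
  | some c =>
    have hc := h c (PySem.List.mem_of_pyGet?_eq_some cs hg)
    fin_cases hc <;> simp <;> decide

-- A's string-splitting of a doubled digit equals B's table lookup
theorem pv_sep_double {d : Int} (h0 : 0 ≤ d) (h9 : d ≤ 9) :
    (let t := PySem.Int.toChars (d * 2)
     if PySem.List.len t == 2 then pvDigit t 0 + pvDigit t 1 else d * 2)
    = (PySem.List.pyGet? pvDOUBLED d).getD 0 := by
  interval_cases d <;> decide

-- an undoubled digit passes through A's separation step unchanged
theorem pv_sep_single {d : Int} (h0 : 0 ≤ d) (h9 : d ≤ 9) :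
    (let t := PySem.Int.toChars d
     if PySem.List.len t == 2 then pvDigit t 0 + pvDigit t 1 else d) = d := by
  interval_cases d <;> decide

theorem pv_ite_bool (b : Bool) : (if b = true then true else false) = b := by
  cases b <;> rfl

-- ===== VERDICT (by name: the statement is the Claim_ definition above) =====
theorem check_id_valid_spec : Claim_equal_check_id_valid := by
  intro n _ hpre
  have hdig := pv_mem_toChars (n := n) (by unfold Pre_check_id_valid at hpre; omega)
  have hb := fun i => pvDigit_bounds hdig i
  have hr : PySem.List.pyRange 0 9 1 = [0,1,2,3,4,5,6,7,8] := by decide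
  unfold Spec_check_id_valid check_id_valid check_id_valid_alt
  simp only [hr, List.map_cons, List.map_nil, List.sum_cons, List.sum_nil, pvGo]
  simp only [show (PySem.Int.mod 0 2 == 1) = false from rfl,
    show (PySem.Int.mod 1 2 == 1) = true from rfl,
    show (PySem.Int.mod 2 2 == 1) = false from rfl,
    show (PySem.Int.mod 3 2 == 1) = true from rfl,
    show (PySem.Int.mod 4 2 == 1) = false from rfl,
    show (PySem.Int.mod 5 2 == 1) = true from rfl,
    show (PySem.Int.mod 6 2 == 1) = false from rfl,
    show (PySem.Int.mod 7 2 == 1) = true from rfl,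
    show (PySem.Int.mod 8 2 == 1) = false from rfl,
    Bool.false_eq_true, if_true, if_false]
  rw [pv_sep_single (hb 0).1 (hb 0).2, pv_sep_double (hb 1).1 (hb 1).2,
    pv_sep_single (hb 2).1 (hb 2).2, pv_sep_double (hb 3).1 (hb 3).2,
    pv_sep_single (hb 4).1 (hb 4).2, pv_sep_double (hb 5).1 (hb 5).2,
    pv_sep_single (hb 6).1 (hb 6).2, pv_sep_double (hb 7).1 (hb 7).2,
    pv_sep_single (hb 8).1 (hb 8).2]
  simp only [add_assoc, zero_add, add_zero]
  exact pv_ite_bool _
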